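-- pv_equiv track=rewrite | github.com/zubenkoivan/spoj | buying_apples.py | min_money_amount
-- ===== SOURCE A (Python) =====
-- def min_money_amount(max_packets, kilograms, prices):
--     for kg in range(2, kilograms + 1):
--         for k in range(1, kg // 2 + 1):
--             if prices[k] == -1 or prices[kg - k] == -1:
--                 continue
--             if prices[kg] == -1:
--                 prices[kg] = prices[k] + prices[kg - k]
--             else:
--                 prices[kg] = min(prices[kg], prices[k] + prices[kg - k])
--     return prices[kilograms]
-- ===== SOURCE B (Python) =====
-- def min_money_amount(max_packets, kilograms, prices):
--     memo = {}
--
--     def dp(kg):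
--         if kg in memo:
--             return memo[kg]
--         v = prices[kg]
--         for k in range(1, kg // 2 + 1):
--             a = dp(k)
--             b = dp(kg - k)
--             if a != -1 and b != -1:
--                 c = a + b
--                 if v == -1 or c < v:
--                     v = c
--         memo[kg] = v
--         return v
--
--     return dp(kilograms)
-- ===== Notes on version B (the rewrite author's own statement) =====
-- stated objective: alternative
-- what changed: Replaces A's bottom-up in-place mutation of the prices table (nested index loops writing -1-sentinel updates into the input list) by a top-down memoized recursion dp(kg) over a fresh dict; the input list is no longer mutated and only the subproblems reachable from `kilograms` are ever touched, while the return value is identical on every input where A returns.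
import Mathlib
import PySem

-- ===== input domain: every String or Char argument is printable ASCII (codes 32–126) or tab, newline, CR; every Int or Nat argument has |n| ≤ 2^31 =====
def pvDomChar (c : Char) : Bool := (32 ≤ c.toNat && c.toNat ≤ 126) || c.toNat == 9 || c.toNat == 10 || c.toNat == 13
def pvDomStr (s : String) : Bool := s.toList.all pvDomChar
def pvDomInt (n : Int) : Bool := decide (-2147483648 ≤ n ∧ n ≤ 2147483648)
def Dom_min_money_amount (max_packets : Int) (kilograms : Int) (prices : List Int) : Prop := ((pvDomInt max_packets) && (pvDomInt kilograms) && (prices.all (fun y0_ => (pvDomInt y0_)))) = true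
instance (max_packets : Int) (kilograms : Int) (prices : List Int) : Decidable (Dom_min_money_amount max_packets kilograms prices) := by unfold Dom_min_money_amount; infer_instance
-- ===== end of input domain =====

-- B replaces A's in-place bottom-up table mutation by top-down memoized recursion over a
-- fresh dict (objective: alternative decomposition; B does not mutate `prices` — the
-- equivalence proved here is about the RETURN value only).

-- ===== PORT A =====
-- one pass of A's inner-loop body: the update of prices[kg] for a given k
def pvStepA (kg : Int) (pr : List Int) (k : Int) : List Int :=
  if PySem.List.pyGetD pr k 0 = -1 ∨ PySem.List.pyGetD pr (kg - k) 0 = -1 then pr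
  else if PySem.List.pyGetD pr kg 0 = -1 then
    PySem.List.pySetD pr kg (PySem.List.pyGetD pr k 0 + PySem.List.pyGetD pr (kg - k) 0)
  else
    PySem.List.pySetD pr kg
      (min (PySem.List.pyGetD pr kg 0) (PySem.List.pyGetD pr k 0 + PySem.List.pyGetD pr (kg - k) 0))

def min_money_amount (max_packets : Int) (kilograms : Int) (prices : List Int) : Int :=
  let pr := (PySem.List.pyRange 2 (kilograms + 1)).foldl
    (fun pr kg =>
      (PySem.List.pyRange 1 (PySem.Int.floordiv kg 2 + 1)).foldl (pvStepA kg) pr)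
    prices
  PySem.List.pyGetD pr kilograms 0

-- ===== PORT B =====
-- transliteration of Source B: pvDpB is the local `dp`, with the memo dict threaded through
-- the `for k in range(1, kg // 2 + 1)` loop as a fold accumulator (v, memo). `fuel` is
-- only a structural bound for the recursion (each recursive call is at 1 <= k <= kg // 2 < kg);
-- pvDpB_correct below shows the result for fuel > kg does not depend on the 0-branch.
def pvDpB (prices : List Int) : Nat → Int → PySem.Dict Int Int → Int × PySem.Dict Int Int
  | fuel, kg, memo =>
    match PySem.Dict.get? memo kg with
    | some v => (v, memo)                              -- if kg in memo: return memo[kg]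
    | none =>
      match fuel with
      | 0 => (0, memo)                                 -- unreachable for fuel > kg
      | f + 1 =>
        let r := (PySem.List.pyRange 1 (PySem.Int.floordiv kg 2 + 1)).foldl
          (fun acc k =>
            let ra := pvDpB prices f k acc.2           -- a = dp(k)
            let rb := pvDpB prices f (kg - k) ra.2     -- b = dp(kg - k)
            (if ra.1 ≠ -1 ∧ rb.1 ≠ -1 then            -- if a != -1 and b != -1:
               (if acc.1 = -1 ∨ ra.1 + rb.1 < acc.1   -- c = a + b; if v == -1 or c < v:
                then ra.1 + rb.1 else acc.1)           --   v = c
             else acc.1, rb.2))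
          (PySem.List.pyGetD prices kg 0, memo)        -- v = prices[kg]
        (r.1, PySem.Dict.insert r.2 kg r.1)            -- memo[kg] = v; return v

def min_money_amount_alt (max_packets : Int) (kilograms : Int) (prices : List Int) : Int :=
  (pvDpB prices (kilograms.toNat + 1) kilograms PySem.Dict.empty).1

-- ===== PRECONDITION & SPEC =====
-- Pre_ is exactly A's return domain: the Python raises IndexError iff some prices[·]
-- access is out of range, which happens iff the index `kilograms` itself is invalid.
def Pre_min_money_amount (max_packets : Int) (kilograms : Int) (prices : List Int) : Prop :=
  PySem.Raise.InRange prices.length kilograms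

instance (max_packets : Int) (kilograms : Int) (prices : List Int) :
    Decidable (Pre_min_money_amount max_packets kilograms prices) := by
  unfold Pre_min_money_amount; infer_instance

def pvWitness_min_money_amount : Int × Int × List Int := (1, 5, [0, 3, 2, -1, 9, 11])

def Spec_min_money_amount (max_packets : Int) (kilograms : Int) (prices : List Int) (out : Int) : Prop := out = min_money_amount_alt max_packets kilograms prices
instance (max_packets : Int) (kilograms : Int) (prices : List Int) (out : Int) : Decidable (Spec_min_money_amount max_packets kilograms prices out) := by unfold Spec_min_money_amount; infer_instance

-- ===== CLAIM (what is proved, stated in full; the proofs are below) =====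
def Claim_equal_min_money_amount : Prop := ∀ (max_packets : Int) (kilograms : Int) (prices : List Int), Dom_min_money_amount max_packets kilograms prices → Pre_min_money_amount max_packets kilograms prices → Spec_min_money_amount max_packets kilograms prices (min_money_amount max_packets kilograms prices)

-- ===== LEMMAS AND PROOFS =====

-- the common update step: the effect of one candidate pair (a, b) on the running value v
def pvPureStep (a b v : Int) : Int :=
  if a = -1 ∨ b = -1 then v else if v = -1 then a + b else min v (a + b)

-- the pure recurrence both programs compute, defined with fuel (pvDF) and at the
-- canonical fuel (pvD): pvD kg = value both programs attach to weight kg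
def pvDF (prices : List Int) : Nat → Int → Int
  | 0, kg => PySem.List.pyGetD prices kg 0
  | f+1, kg =>
    (PySem.List.pyRange 1 (PySem.Int.floordiv kg 2 + 1)).foldl
      (fun v k => pvPureStep (pvDF prices f k) (pvDF prices f (kg - k)) v)
      (PySem.List.pyGetD prices kg 0)

def pvD (prices : List Int) (kg : Int) : Int := pvDF prices (kg.toNat + 1) kg

lemma pv_mem_bounds {kg k : Int}
    (h : k ∈ PySem.List.pyRange 1 (PySem.Int.floordiv kg 2 + 1)) :
    1 ≤ k ∧ k < kg ∧ 1 ≤ kg - k ∧ kg - k < kg ∧ 2 ≤ kg := by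
  obtain ⟨h1, h2⟩ := PySem.List.mem_pyRange_one.mp h
  have e : PySem.Int.floordiv kg 2 = kg / 2 :=
    PySem.Int.floordiv_eq_ediv_of_pos (by norm_num)
  omega

lemma pv_range_empty {kg : Int} (h : kg ≤ 1) :
    PySem.List.pyRange 1 (PySem.Int.floordiv kg 2 + 1) = [] := by
  have e : PySem.Int.floordiv kg 2 = kg / 2 :=
    PySem.Int.floordiv_eq_ediv_of_pos (by norm_num)
  exact PySem.List.pyRange_one_eq_nil (by omega)

lemma pvDF_irrel (prices : List Int) :
    ∀ (n : Nat) (kg : Int) (f g : Nat), kg.toNat ≤ n → kg.toNat < f → kg.toNat < g →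
      pvDF prices f kg = pvDF prices g kg := by
  intro n
  induction n with
  | zero =>
    intro kg f g hn hf hg
    obtain ⟨f', rfl⟩ : ∃ f', f = f' + 1 := ⟨f - 1, by omega⟩
    obtain ⟨g', rfl⟩ : ∃ g', g = g' + 1 := ⟨g - 1, by omega⟩
    have hkg : kg ≤ 1 := by omega
    simp only [pvDF]
    rw [pv_range_empty hkg]
    rfl
  | succ n ih =>
    intro kg f g hn hf hg
    obtain ⟨f', rfl⟩ : ∃ f', f = f' + 1 := ⟨f - 1, by omega⟩
    obtain ⟨g', rfl⟩ : ∃ g', g = g' + 1 := ⟨g - 1, by omega⟩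
    simp only [pvDF]
    refine PySem.List.foldl_congr_mem _ _ _ _ (fun v k hk => ?_)
    obtain ⟨hk1, hk2, hk3, hk4, hk5⟩ := pv_mem_bounds hk
    rw [ih k f' g' (by omega) (by omega) (by omega),
        ih (kg - k) f' g' (by omega) (by omega) (by omega)]

lemma pvDF_eq_pvD (prices : List Int) (kg : Int) (f : Nat) (hf : kg.toNat < f) :
    pvDF prices f kg = pvD prices kg :=
  pvDF_irrel prices kg.toNat kg f (kg.toNat + 1) le_rfl hf (by omega)

-- the defining recurrence of pvD
lemma pvD_eq (prices : List Int) (kg : Int) :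
    pvD prices kg =
      (PySem.List.pyRange 1 (PySem.Int.floordiv kg 2 + 1)).foldl
        (fun v k => pvPureStep (pvD prices k) (pvD prices (kg - k)) v)
        (PySem.List.pyGetD prices kg 0) := by
  show pvDF prices (kg.toNat + 1) kg = _
  simp only [pvDF]
  refine PySem.List.foldl_congr_mem _ _ _ _ (fun v k hk => ?_)
  obtain ⟨hk1, hk2, hk3, hk4, hk5⟩ := pv_mem_bounds hk
  rw [pvDF_eq_pvD prices k kg.toNat (by omega),
      pvDF_eq_pvD prices (kg - k) kg.toNat (by omega)]

lemma pvD_of_le_one (prices : List Int) {kg : Int} (h : kg ≤ 1) :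
    pvD prices kg = PySem.List.pyGetD prices kg 0 := by
  rw [pvD_eq, pv_range_empty h]; rfl

-- B's if-chain is pvPureStep
lemma pvStepB_eq (a b v : Int) :
    (if a ≠ -1 ∧ b ≠ -1 then (if v = -1 ∨ a + b < v then a + b else v) else v) =
      pvPureStep a b v := by
  unfold pvPureStep
  split_ifs <;> omega

-- ===== correctness of port B: the memo is coherent and dp computes pvD =====
def pvCoh (prices : List Int) (memo : PySem.Dict Int Int) : Prop :=
  ∀ k v, memo.get? k = some v → v = pvD prices k

lemma pvCoh_empty (prices : List Int) : pvCoh prices PySem.Dict.empty := by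
  intro k v h
  simp [PySem.Dict.get?, PySem.Dict.empty] at h

lemma pvFoldB_correct (prices : List Int) (f : Nat) (kg : Int)
    (IH : ∀ j : Int, j.toNat < kg.toNat → ∀ memo, pvCoh prices memo →
      (pvDpB prices f j memo).1 = pvD prices j ∧ pvCoh prices (pvDpB prices f j memo).2) :
    ∀ (ks : List Int), (∀ k ∈ ks, 1 ≤ k ∧ k < kg ∧ 1 ≤ kg - k ∧ kg - k < kg) →
      ∀ (v : Int) (memo : PySem.Dict Int Int), pvCoh prices memo →
      (ks.foldl
          (fun acc k =>
            let ra := pvDpB prices f k acc.2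
            let rb := pvDpB prices f (kg - k) ra.2
            (if ra.1 ≠ -1 ∧ rb.1 ≠ -1 then
               (if acc.1 = -1 ∨ ra.1 + rb.1 < acc.1 then ra.1 + rb.1 else acc.1)
             else acc.1, rb.2)) (v, memo)).1 =
        ks.foldl (fun v k => pvPureStep (pvD prices k) (pvD prices (kg - k)) v) v
      ∧ pvCoh prices (ks.foldl
          (fun acc k =>
            let ra := pvDpB prices f k acc.2
            let rb := pvDpB prices f (kg - k) ra.2
            (if ra.1 ≠ -1 ∧ rb.1 ≠ -1 then
               (if acc.1 = -1 ∨ ra.1 + rb.1 < acc.1 then ra.1 + rb.1 else acc.1)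
             else acc.1, rb.2)) (v, memo)).2 := by
  intro ks
  induction ks with
  | nil => intro _ v memo h; exact ⟨rfl, h⟩
  | cons k rest ih =>
    intro hks v memo hcoh
    obtain ⟨hk1, hk2, hk3, hk4⟩ := hks k (List.mem_cons_self)
    obtain ⟨ha, hca⟩ := IH k (by omega) memo hcoh
    obtain ⟨hb, hcb⟩ := IH (kg - k) (by omega) _ hca
    have hacc : (let ra := pvDpB prices f k ((v, memo) : Int × PySem.Dict Int Int).2
        let rb := pvDpB prices f (kg - k) ra.2
        ((if ra.1 ≠ -1 ∧ rb.1 ≠ -1 then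
           (if ((v, memo) : Int × PySem.Dict Int Int).1 = -1 ∨ ra.1 + rb.1 < ((v, memo) : Int × PySem.Dict Int Int).1
            then ra.1 + rb.1 else ((v, memo) : Int × PySem.Dict Int Int).1)
         else ((v, memo) : Int × PySem.Dict Int Int).1, rb.2) : Int × PySem.Dict Int Int))
        = (pvPureStep (pvD prices k) (pvD prices (kg - k)) v,
           (pvDpB prices f (kg - k) (pvDpB prices f k memo).2).2) := by
      simp only [ha, hb, pvStepB_eq]
    rw [List.foldl_cons, List.foldl_cons, hacc]
    exact ih (fun x hx => hks x (List.mem_cons_of_mem _ hx)) _ _ hcb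

lemma pvDpB_correct (prices : List Int) :
    ∀ (n : Nat) (kg : Int), kg.toNat < n → ∀ memo, pvCoh prices memo →
      (pvDpB prices n kg memo).1 = pvD prices kg ∧
      pvCoh prices (pvDpB prices n kg memo).2 := by
  intro n
  induction n with
  | zero => intro kg h; omega
  | succ n ih =>
    intro kg hkg memo hcoh
    rw [pvDpB]
    cases hm : PySem.Dict.get? memo kg with
    | some v => exact ⟨hcoh _ _ hm, hcoh⟩
    | none =>
      simp only
      have IH : ∀ j : Int, j.toNat < kg.toNat → ∀ memo, pvCoh prices memo →
          (pvDpB prices n j memo).1 = pvD prices j ∧ pvCoh prices (pvDpB prices n j memo).2 :=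
        fun j hj => ih j (by omega)
      obtain ⟨hl1, hl2⟩ := pvFoldB_correct prices n kg IH
        (PySem.List.pyRange 1 (PySem.Int.floordiv kg 2 + 1))
        (fun k hk => by
          obtain ⟨a, b, c, d, _⟩ := pv_mem_bounds hk
          exact ⟨a, b, c, d⟩)
        (PySem.List.pyGetD prices kg 0) memo hcoh
      rw [← pvD_eq] at hl1
      refine ⟨hl1, ?_⟩
      intro k' v' h'
      by_cases hk' : k' = kg
      · subst hk'
        rw [PySem.Dict.get?_insert_self] at h'
        rw [← Option.some_inj.mp h', hl1]
      · rw [PySem.Dict.get?_insert_of_ne _ _ hk'] at h'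
        exact hl2 _ _ h'

lemma pv_alt_eq (max_packets kilograms : Int) (prices : List Int) :
    min_money_amount_alt max_packets kilograms prices = pvD prices kilograms :=
  (pvDpB_correct prices (kilograms.toNat + 1) kilograms (by omega)
    PySem.Dict.empty (pvCoh_empty prices)).1

-- ===== correctness of port A: the in-place table ends up holding pvD =====
-- invariant of the partially filled table: positions below `m` hold pvD, the rest is intact
def pvInv (prices : List Int) (m : Int) (L : List Int) : Prop :=
  L.length = prices.length ∧
  ∀ j : Nat, j < prices.length →
    PySem.List.pyGetD L (j : Int) 0 =
      if (j : Int) < m then pvD prices (j : Int) else PySem.List.pyGetD prices (j : Int) 0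

-- writing position m of a list, seen through pyGetD at a Nat index
lemma pv_set_pointwise (xs : List Int) (m : Int) (hm : 0 ≤ m) (hmlen : m < (xs.length : Int))
    (w : Int) (j : Nat) :
    PySem.List.pyGetD (PySem.List.pySetD xs m w) (j : Int) 0 =
      if (j : Int) = m then w else PySem.List.pyGetD xs (j : Int) 0 := by
  have h1 : m = ((m.toNat : Nat) : Int) := by omega
  rw [h1, PySem.List.pyGetD_pySetD_natCast xs m.toNat j w 0 (by omega)]
  by_cases hj : j = m.toNat
  · simp [hj]
  · rw [if_neg hj, if_neg (by omega)]

lemma pvInner_fold (prices : List Int) (m : Int) (hm2 : 2 ≤ m)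
    (hmlen : m < (prices.length : Int)) (L : List Int) (hL : pvInv prices m L) :
    ∀ (ks : List Int), (∀ k ∈ ks, 1 ≤ k ∧ k < m ∧ 1 ≤ m - k ∧ m - k < m) →
      ∀ (L' : List Int) (v : Int), L'.length = prices.length →
      (∀ j : Nat, j < prices.length →
        PySem.List.pyGetD L' (j : Int) 0 =
          if (j : Int) = m then v else PySem.List.pyGetD L (j : Int) 0) →
      (ks.foldl (pvStepA m) L').length = prices.length ∧
      ∀ j : Nat, j < prices.length →
        PySem.List.pyGetD (ks.foldl (pvStepA m) L') (j : Int) 0 =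
          if (j : Int) = m then
            ks.foldl (fun v k => pvPureStep (pvD prices k) (pvD prices (m - k)) v) v
          else PySem.List.pyGetD L (j : Int) 0 := by
  intro ks
  induction ks with
  | nil => intro _ L' v hlen' hpt; exact ⟨hlen', hpt⟩
  | cons k rest ih =>
    intro hks L' v hlen' hpt
    obtain ⟨hk1, hk2, hk3, hk4⟩ := hks k (List.mem_cons_self)
    -- the three reads the loop body performs
    have hra : PySem.List.pyGetD L' k 0 = pvD prices k := by
      have e : k = ((k.toNat : Nat) : Int) := by omega
      rw [e, hpt k.toNat (by omega), if_neg (by omega)]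
      rw [(hL.2 k.toNat (by omega)), if_pos (by omega)]
    have hrb : PySem.List.pyGetD L' (m - k) 0 = pvD prices (m - k) := by
      have e : m - k = (((m - k).toNat : Nat) : Int) := by omega
      rw [e, hpt (m - k).toNat (by omega), if_neg (by omega)]
      rw [(hL.2 (m - k).toNat (by omega)), if_pos (by omega)]
    have hrv : PySem.List.pyGetD L' m 0 = v := by
      have e : m = ((m.toNat : Nat) : Int) := by omega
      rw [e, hpt m.toNat (by omega),
        if_pos (show ((m.toNat : Nat) : Int) = m by omega)]
    -- the effect of one step of A's inner loop
    have key : (pvStepA m L' k).length = prices.length ∧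
        ∀ j : Nat, j < prices.length →
          PySem.List.pyGetD (pvStepA m L' k) (j : Int) 0 =
            if (j : Int) = m then pvPureStep (pvD prices k) (pvD prices (m - k)) v
            else PySem.List.pyGetD L (j : Int) 0 := by
      unfold pvStepA pvPureStep
      rw [hra, hrb, hrv]
      split_ifs with h1 h2
      · exact ⟨hlen', hpt⟩
      · refine ⟨by rw [PySem.List.length_pySetD]; exact hlen', fun j hj => ?_⟩
        rw [pv_set_pointwise L' m (by omega) (by rw [hlen']; exact hmlen) _ j]
        by_cases hjm : (j : Int) = m
        · rw [if_pos hjm, if_pos hjm]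
        · rw [if_neg hjm, if_neg hjm, hpt j hj, if_neg hjm]
      · refine ⟨by rw [PySem.List.length_pySetD]; exact hlen', fun j hj => ?_⟩
        rw [pv_set_pointwise L' m (by omega) (by rw [hlen']; exact hmlen) _ j]
        by_cases hjm : (j : Int) = m
        · rw [if_pos hjm, if_pos hjm]
        · rw [if_neg hjm, if_neg hjm, hpt j hj, if_neg hjm]
    simpa using ih (fun x hx => hks x (List.mem_cons_of_mem _ hx)) (pvStepA m L' k)
      (pvPureStep (pvD prices k) (pvD prices (m - k)) v) key.1 key.2

lemma pvOuter (prices : List Int) (kil : Int) (hlen : kil < (prices.length : Int)) :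
    ∀ (t : Nat), 2 + (t : Int) ≤ kil + 1 →
      pvInv prices (2 + (t : Int))
        ((PySem.List.pyRange 2 (2 + (t : Int))).foldl
          (fun pr kg =>
            (PySem.List.pyRange 1 (PySem.Int.floordiv kg 2 + 1)).foldl (pvStepA kg) pr)
          prices) := by
  intro t
  induction t with
  | zero =>
    intro _
    rw [show ((0 : Nat) : Int) = 0 by rfl]
    rw [PySem.List.pyRange_one_eq_nil (by omega)]
    simp only [List.foldl_nil]
    refine ⟨rfl, fun j hj => ?_⟩
    by_cases hj2 : (j : Int) < 2 + 0
    · rw [if_pos hj2, pvD_of_le_one prices (by omega)]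
    · rw [if_neg hj2]
  | succ t ih =>
    intro ht
    have hm2 : (2 : Int) ≤ 2 + (t : Int) := by omega
    have hcast : 2 + ((t + 1 : Nat) : Int) = (2 + (t : Int)) + 1 := by push_cast; ring
    rw [hcast, PySem.List.pyRange_one_succ_right (by omega), List.foldl_append]
    set m : Int := 2 + (t : Int) with hm
    obtain ⟨hlenL, hptL⟩ := ih (by omega)
    set L := (PySem.List.pyRange 2 m).foldl
      (fun pr kg =>
        (PySem.List.pyRange 1 (PySem.Int.floordiv kg 2 + 1)).foldl (pvStepA kg) pr)
      prices with hLdef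
    simp only [List.foldl_cons, List.foldl_nil]
    have hinv : pvInv prices m L := ⟨hlenL, hptL⟩
    obtain ⟨h1, h2⟩ := pvInner_fold prices m hm2 (by omega) L hinv
      (PySem.List.pyRange 1 (PySem.Int.floordiv m 2 + 1))
      (fun k hk => by
        obtain ⟨a, b, c, d, _⟩ := pv_mem_bounds hk
        exact ⟨a, b, c, d⟩)
      L (PySem.List.pyGetD L m 0) hlenL
      (fun j hj => by
        by_cases hjm : (j : Int) = m
        · rw [if_pos hjm, hjm]
        · rw [if_neg hjm])
    have hvm : PySem.List.pyGetD L m 0 = PySem.List.pyGetD prices m 0 := by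
      have e : m = ((m.toNat : Nat) : Int) := by omega
      rw [e, hptL m.toNat (by omega), if_neg (by omega)]
    refine ⟨h1, fun j hj => ?_⟩
    rw [h2 j hj]
    by_cases hjm : (j : Int) = m
    · rw [if_pos hjm, if_pos (by omega), hjm, hvm, ← pvD_eq]
    · by_cases hjlt : (j : Int) < m
      · rw [if_neg hjm, hptL j hj, if_pos hjlt, if_pos (by omega)]
      · rw [if_neg hjm, hptL j hj, if_neg hjlt, if_neg (by omega)]

-- ===== VERDICT (by name: the statement is the Claim_ definition above) =====
theorem min_money_amount_spec : Claim_equal_min_money_amount := by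
  intro max_packets kil prices _ hpre
  unfold Spec_min_money_amount
  rw [pv_alt_eq]
  unfold Pre_min_money_amount PySem.Raise.InRange at hpre
  unfold min_money_amount
  by_cases h2 : kil ≤ 1
  · rw [PySem.List.pyRange_one_eq_nil (by omega)]
    simp only [List.foldl_nil]
    rw [pvD_of_le_one prices h2]
  · have hlen : kil < (prices.length : Int) := hpre.2
    have h' := pvOuter prices kil hlen (kil - 1).toNat (by omega)
    unfold pvInv at h'
    have e : 2 + (((kil - 1).toNat : Nat) : Int) = kil + 1 := by omega
    rw [e] at h'
    obtain ⟨hlenL, hpt⟩ := h'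
    have hfin := hpt kil.toNat (by omega)
    rw [if_pos (by omega), show ((kil.toNat : Nat) : Int) = kil from by omega] at hfin
    exact hfin
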